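-- pv_equiv track=rewrite | github.com/ibrahimelcheikh05-hub/restaurant-ai-receptionist | upsell.py | _get_missing_categories
-- ===== SOURCE A (Python) =====
-- from typing import Dict, List, Any, Optional, Set
--
-- UPSELL_CATEGORIES = {
--     "drinks": ["soda", "juice", "water", "tea", "coffee"],
--     "sides": ["fries", "salad", "coleslaw", "breadsticks", "wings"],
--     "desserts": ["cake", "pie", "ice cream", "cookie", "brownie"],
--     "upgrades": ["large", "extra", "premium", "deluxe", "combo"]
-- }
--
-- def _get_missing_categories(current_items: List[Dict[str, Any]]) -> Set[str]:
--     """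
--     Determine which categories are missing from order.
--
--     Args:
--         current_items: Current order items
--
--     Returns:
--         Set of missing categories
--     """
--     present_categories = set()
--
--     for item in current_items:
--         category = item.get("category", "").lower()
--
--         # Map to upsell categories
--         for upsell_cat, keywords in UPSELL_CATEGORIES.items():
--             if any(kw in category for kw in keywords):
--                 present_categories.add(upsell_cat)
--
--     # Return missing categories
--     all_categories = set(UPSELL_CATEGORIES.keys())
--     missing = all_categories - present_categories
--
--     return missing
-- ===== SOURCE B (Python) =====
-- from typing import Dict, List, Any, Set
--
-- UPSELL_CATEGORIES = {
--     "drinks": ["soda", "juice", "water", "tea", "coffee"],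
--     "sides": ["fries", "salad", "coleslaw", "breadsticks", "wings"],
--     "desserts": ["cake", "pie", "ice cream", "cookie", "brownie"],
--     "upgrades": ["large", "extra", "premium", "deluxe", "combo"]
-- }
--
-- def _get_missing_categories(current_items: List[Dict[str, Any]]) -> Set[str]:
--     # Build ONE search text: all lowercased item categories joined by a NUL
--     # separator. No keyword contains NUL, so a keyword occurs in the joined
--     # text iff it occurs inside some single item's category. Each keyword is
--     # then tested once against this single string instead of per item.
--     text = "\x00".join(item.get("category", "").lower() for item in current_items)
--     return {cat for cat, kws in UPSELL_CATEGORIES.items()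
--             if not any(kw in text for kw in kws)}
-- ===== Notes on version B (the rewrite author's own statement) =====
-- stated objective: alternative
-- what changed: B joins all lowercased item categories into one NUL-separated search text and tests each fixed keyword once against that single string (no keyword contains NUL, so containment in the joined text equals containment in some item), replacing A's per-item accumulate-present-set-then-subtract loops.
import Mathlib
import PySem

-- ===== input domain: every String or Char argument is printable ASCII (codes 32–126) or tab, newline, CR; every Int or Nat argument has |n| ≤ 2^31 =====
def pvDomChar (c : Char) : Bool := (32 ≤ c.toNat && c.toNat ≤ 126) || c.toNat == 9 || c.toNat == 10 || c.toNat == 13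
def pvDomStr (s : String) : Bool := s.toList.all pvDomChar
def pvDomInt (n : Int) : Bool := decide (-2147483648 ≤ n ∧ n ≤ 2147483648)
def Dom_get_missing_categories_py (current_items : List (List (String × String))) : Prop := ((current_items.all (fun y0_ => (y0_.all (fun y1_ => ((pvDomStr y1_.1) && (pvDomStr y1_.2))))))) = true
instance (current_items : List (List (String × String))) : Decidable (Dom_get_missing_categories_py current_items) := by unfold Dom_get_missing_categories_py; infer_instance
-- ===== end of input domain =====

-- B builds one NUL-joined search text of all lowercased categories and tests each keyword
-- once against it, instead of A's per-item accumulate-present-then-set-subtract; objective: alternative.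

-- Shared module constant UPSELL_CATEGORIES (a dict, as an association list in insertion order)
def upsellCategories : List (String × List String) :=
  [("drinks", ["soda", "juice", "water", "tea", "coffee"]),
   ("sides", ["fries", "salad", "coleslaw", "breadsticks", "wings"]),
   ("desserts", ["cake", "pie", "ice cream", "cookie", "brownie"]),
   ("upgrades", ["large", "extra", "premium", "deluxe", "combo"])]

-- ===== PORT A =====
def get_missing_categories_py (current_items : List (List (String × String))) : List String :=
  let present_categories : PySem.Set String :=
    current_items.foldl (fun present_categories item =>
      let category := PySem.Str.lower ((PySem.Dict.mk item).getD "category" "")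
      upsellCategories.foldl (fun present_categories p =>
        if p.2.any (fun kw => PySem.Str.isIn kw category) then
          PySem.Set.add present_categories p.1
        else present_categories) present_categories)
      PySem.Set.empty
  let all_categories : PySem.Set String := PySem.Set.ofList (upsellCategories.map Prod.fst)
  PySem.Set.diff all_categories present_categories

-- ===== PORT B =====
def get_missing_categories_py_alt (current_items : List (List (String × String))) : List String :=
  let text := PySem.Str.join "\x00"
    (current_items.map (fun item => PySem.Str.lower ((PySem.Dict.mk item).getD "category" "")))
  PySem.Set.ofList
    ((upsellCategories.filter (fun p =>
        !(p.2.any (fun kw => PySem.Str.isIn kw text)))).map Prod.fst)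

-- ===== PRECONDITION & SPEC =====
def Spec_get_missing_categories_py (current_items : List (List (String × String))) (out : List String) : Prop := out = get_missing_categories_py_alt current_items
instance (current_items : List (List (String × String))) (out : List String) : Decidable (Spec_get_missing_categories_py current_items out) := by unfold Spec_get_missing_categories_py; infer_instance

-- ===== CLAIM (what is proved, stated in full; the proofs are below) =====
def Claim_equal_get_missing_categories_py : Prop := ∀ (current_items : List (List (String × String))), Dom_get_missing_categories_py current_items → Spec_get_missing_categories_py current_items (get_missing_categories_py current_items)

-- ===== LEMMAS AND PROOFS =====

-- the lowercased category of one item, and the joined search text of B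
def pvCat (item : List (String × String)) : String :=
  PySem.Str.lower ((PySem.Dict.mk item).getD "category" "")

-- one item hits one (category, keywords) pair
def pvHit (p : String × List String) (item : List (String × String)) : Bool :=
  p.2.any (fun kw => PySem.Str.isIn kw (pvCat item))

-- a prefix of a ++ c :: m avoiding c lies entirely in a
theorem prefix_no_sep {c : Char} : ∀ {kw a m : List Char}, c ∉ kw →
    kw <+: a ++ c :: m → kw <+: a := by
  intro kw
  induction kw with
  | nil => intro a m _ _; exact List.nil_prefix
  | cons x xs ih =>
    intro a m hc hp
    cases a with
    | nil =>
      exfalso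
      rcases List.cons_prefix_cons.mp hp with ⟨rfl, _⟩
      exact hc (List.mem_cons_self)
    | cons y ys =>
      rcases List.cons_prefix_cons.mp hp with ⟨rfl, htail⟩
      exact List.cons_prefix_cons.mpr ⟨rfl,
        ih (fun h => hc (List.mem_cons_of_mem _ h)) htail⟩

-- an infix of a ++ c :: m avoiding c lies in a or in m
theorem infix_sep {c : Char} {kw : List Char} (hc : c ∉ kw) :
    ∀ {a m : List Char}, (kw <:+: a ++ c :: m ↔ kw <:+: a ∨ kw <:+: m) := by
  intro a
  induction a with
  | nil =>
    intro m
    simp only [List.nil_append, List.infix_cons_iff]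
    constructor
    · rintro (hp | hi)
      · cases kw with
        | nil => exact Or.inl List.nil_infix
        | cons x xs =>
          exfalso
          rcases List.cons_prefix_cons.mp hp with ⟨rfl, _⟩
          exact hc (List.mem_cons_self)
      · exact Or.inr hi
    · rintro (h | h)
      · rcases List.eq_nil_of_infix_nil h with rfl
        exact Or.inl List.nil_prefix
      · exact Or.inr h
  | cons y ys ih =>
    intro m
    rw [List.cons_append, List.infix_cons_iff, List.infix_cons_iff]
    constructor
    · rintro (hp | hi)
      · cases kw with
        | nil => exact Or.inl (Or.inl (List.nil_prefix))
        | cons x xs =>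
          rcases List.cons_prefix_cons.mp hp with ⟨rfl, htail⟩
          exact Or.inl (Or.inl (List.cons_prefix_cons.mpr ⟨rfl,
            prefix_no_sep (fun h => hc (List.mem_cons_of_mem _ h)) htail⟩))
      · rcases ih.mp hi with h | h
        · exact Or.inl (Or.inr h)
        · exact Or.inr h
    · rintro ((hp | hi) | h)
      · exact Or.inl (by
          simpa using hp.trans (List.prefix_append (y :: ys) (c :: m)))
      · exact Or.inr (ih.mpr (Or.inl hi))
      · exact Or.inr (ih.mpr (Or.inr h))

-- a c-free nonempty keyword occurs in the c-joined text iff it occurs in some segment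
theorem isIn_join {c : Char} {kw : List Char} (hne : kw ≠ []) (hc : c ∉ kw) :
    ∀ (segs : List (List Char)),
      PySem.Chars.isIn kw (PySem.Chars.join [c] segs) = segs.any (fun s => PySem.Chars.isIn kw s) := by
  intro segs
  induction segs with
  | nil =>
    simp only [List.any_nil]
    rw [show PySem.Chars.join [c] [] = [] from PySem.Chars.join_nil _]
    rw [PySem.Chars.isIn_eq_false_iff]
    intro h
    exact hne (List.eq_nil_of_infix_nil h)
  | cons s t ih =>
    cases t with
    | nil =>
      simp only [List.any_cons, List.any_nil, Bool.or_false]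
      rw [show PySem.Chars.join [c] [s] = s from PySem.Chars.join_singleton _ _]
    | cons s' t' =>
      rw [PySem.Chars.join_cons_cons]
      simp only [List.any_cons] at ih ⊢
      cases hA : PySem.Chars.isIn kw (s ++ [c] ++ PySem.Chars.join [c] (s' :: t'))
      · rw [PySem.Chars.isIn_eq_false_iff] at hA
        rw [show s ++ [c] ++ PySem.Chars.join [c] (s' :: t') =
            s ++ c :: PySem.Chars.join [c] (s' :: t') from by simp] at hA
        rw [infix_sep hc, not_or] at hA
        have h1 : PySem.Chars.isIn kw s = false := by
          rw [PySem.Chars.isIn_eq_false_iff]; exact hA.1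
        have h2 : PySem.Chars.isIn kw (PySem.Chars.join [c] (s' :: t')) = false := by
          rw [PySem.Chars.isIn_eq_false_iff]; exact hA.2
        rw [h2] at ih
        simp [h1, ← ih]
      · rw [PySem.Chars.isIn_iff_infix] at hA
        rw [show s ++ [c] ++ PySem.Chars.join [c] (s' :: t') =
            s ++ c :: PySem.Chars.join [c] (s' :: t') from by simp] at hA
        rw [infix_sep hc] at hA
        rcases hA with h | h
        · have hs : PySem.Chars.isIn kw s = true := by
            rw [PySem.Chars.isIn_iff_infix]; exact h
          simp [hs]
        · have hj : PySem.Chars.isIn kw (PySem.Chars.join [c] (s' :: t')) = true := by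
            rw [PySem.Chars.isIn_iff_infix]; exact h
          rw [hj] at ih
          simp [← ih]

-- swapping the two `any`s and collapsing the item loop into the joined text
theorem any_hit_eq (items : List (List (String × String))) (kws : List String)
    (h : ∀ kw ∈ kws, kw.toList ≠ [] ∧ '\x00' ∉ kw.toList) :
    items.any (fun item => kws.any (fun kw => PySem.Str.isIn kw (pvCat item))) =
      kws.any (fun kw => PySem.Str.isIn kw (PySem.Str.join "\x00" (items.map pvCat))) := by
  have single : ∀ kw ∈ kws,
      PySem.Str.isIn kw (PySem.Str.join "\x00" (items.map pvCat)) =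
        items.any (fun item => PySem.Str.isIn kw (pvCat item)) := by
    intro kw hkw
    rcases h kw hkw with ⟨hne, hc⟩
    have hj : (PySem.Str.join "\x00" (items.map pvCat)).toList =
        PySem.Chars.join ['\x00'] ((items.map pvCat).map String.toList) := by simp
    rw [show PySem.Str.isIn kw (PySem.Str.join "\x00" (items.map pvCat)) =
        PySem.Chars.isIn kw.toList (PySem.Str.join "\x00" (items.map pvCat)).toList from by simp]
    rw [hj, isIn_join hne hc]
    rw [List.map_map, List.any_map]
    simp only [Function.comp_def]
    simp
  rw [Bool.eq_iff_iff]
  simp only [List.any_eq_true]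
  constructor
  · rintro ⟨item, hitem, kw, hkw, hin⟩
    refine ⟨kw, hkw, ?_⟩
    rw [single kw hkw]
    exact List.any_eq_true.mpr ⟨item, hitem, hin⟩
  · rintro ⟨kw, hkw, hin⟩
    rw [single kw hkw] at hin
    rcases List.any_eq_true.mp hin with ⟨item, hitem, hin⟩
    exact ⟨item, hitem, kw, hkw, hin⟩

-- membership after the inner fold over an arbitrary pair list
theorem mem_inner_fold (l : List (String × List String)) (f : (String × List String) → Bool)
    (pres : PySem.Set String) (x : String) :
    (x ∈ l.foldl (fun pr p => if f p then PySem.Set.add pr p.1 else pr) pres) ↔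
      x ∈ pres ∨ ∃ p ∈ l, f p ∧ x = p.1 := by
  induction l generalizing pres with
  | nil => simp
  | cons h t ih =>
    simp only [List.foldl_cons, ih]
    by_cases hf : f h
    · simp only [hf, if_pos, PySem.Set.mem_add, List.mem_cons]
      constructor
      · rintro ((hm | rfl) | ⟨p, hp, hfp, rfl⟩)
        · exact Or.inl hm
        · exact Or.inr ⟨h, Or.inl rfl, hf, rfl⟩
        · exact Or.inr ⟨p, Or.inr hp, hfp, rfl⟩
      · rintro (hm | ⟨p, (rfl | hp), hfp, rfl⟩)
        · exact Or.inl (Or.inl hm)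
        · exact Or.inl (Or.inr rfl)
        · exact Or.inr ⟨p, hp, hfp, rfl⟩
    · simp only [hf, if_neg, Bool.false_eq_true, not_false_eq_true, List.mem_cons]
      constructor
      · rintro (hm | ⟨p, hp, hfp, rfl⟩)
        · exact Or.inl hm
        · exact Or.inr ⟨p, Or.inr hp, hfp, rfl⟩
      · rintro (hm | ⟨p, (rfl | hp), hfp, rfl⟩)
        · exact Or.inl hm
        · exact absurd hfp (by simp [hf])
        · exact Or.inr ⟨p, hp, hfp, rfl⟩

-- membership after A's outer fold
theorem mem_outer_fold (items : List (List (String × String)))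
    (pres : PySem.Set String) (x : String) :
    (x ∈ items.foldl (fun pr item =>
        upsellCategories.foldl (fun pr p =>
          if p.2.any (fun kw =>
              PySem.Str.isIn kw (PySem.Str.lower ((PySem.Dict.mk item).getD "category" ""))) then
            PySem.Set.add pr p.1
          else pr) pr) pres) ↔
      x ∈ pres ∨ ∃ item ∈ items, ∃ p ∈ upsellCategories, pvHit p item ∧ x = p.1 := by
  induction items generalizing pres with
  | nil => simp
  | cons it t ih =>
    simp only [List.foldl_cons, ih, List.mem_cons]
    constructor
    · rintro (h | h)
      · rcases (mem_inner_fold upsellCategories _ pres x).mp h with h | ⟨p, hp, hf, hx⟩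
        · exact Or.inl h
        · exact Or.inr ⟨it, Or.inl rfl, p, hp, hf, hx⟩
      · rcases h with ⟨item, hitem, rest⟩
        exact Or.inr ⟨item, Or.inr hitem, rest⟩
    · rintro (h | ⟨item, (rfl | hmem), rest⟩)
      · exact Or.inl ((mem_inner_fold upsellCategories _ pres x).mpr (Or.inl h))
      · exact Or.inl ((mem_inner_fold upsellCategories _ pres x).mpr
          (Or.inr (by simpa [pvHit, pvCat] using rest)))
      · exact Or.inr ⟨item, hmem, rest⟩

theorem get_missing_eq (items : List (List (String × String))) :
    get_missing_categories_py items = get_missing_categories_py_alt items := by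
  unfold get_missing_categories_py get_missing_categories_py_alt
  set pres := items.foldl (fun pr item =>
      upsellCategories.foldl (fun pr p =>
        if p.2.any (fun kw =>
            PySem.Str.isIn kw (PySem.Str.lower ((PySem.Dict.mk item).getD "category" ""))) then
          PySem.Set.add pr p.1
        else pr) pr) PySem.Set.empty with hpres
  set text := PySem.Str.join "\x00"
    (items.map (fun item => PySem.Str.lower ((PySem.Dict.mk item).getD "category" ""))) with htext
  have htext' : text = PySem.Str.join "\x00" (items.map pvCat) := by
    rw [htext]; rfl
  have key : ∀ (p : String × List String), p ∈ upsellCategories →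
      (∀ q ∈ upsellCategories, q.1 = p.1 → q = p) →
      (∀ kw ∈ p.2, kw.toList ≠ [] ∧ '\x00' ∉ kw.toList) →
      pres.contains p.1 = p.2.any (fun kw => PySem.Str.isIn kw text) := by
    intro p hp huniq hkws
    have h' : (p.1 ∈ pres) ↔ items.any (fun item => pvHit p item) = true := by
      rw [hpres]
      rw [mem_outer_fold]
      simp only [PySem.Set.empty, List.not_mem_nil, false_or, List.any_eq_true]
      constructor
      · rintro ⟨item, hitem, q, hq, hf, hx⟩
        have : q = p := huniq q hq hx.symm
        subst this
        exact ⟨item, hitem, hf⟩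
      · rintro ⟨item, hitem, hf⟩
        exact ⟨item, hitem, p, hp, hf, rfl⟩
    have hB : items.any (fun item => pvHit p item) =
        p.2.any (fun kw => PySem.Str.isIn kw text) := by
      rw [htext']
      exact any_hit_eq items p.2 hkws
    rw [← hB]
    by_cases hmem : p.1 ∈ pres
    · rw [h'.mp hmem]; simpa using hmem
    · have hAny : items.any (fun item => pvHit p item) = false := by
        cases hA : items.any (fun item => pvHit p item)
        · rfl
        · exact absurd (h'.mpr hA) hmem
      rw [hAny]; simpa using hmem
  have k1 := key ("drinks", ["soda", "juice", "water", "tea", "coffee"]) (by decide) (by decide) (by decide)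
  have k2 := key ("sides", ["fries", "salad", "coleslaw", "breadsticks", "wings"]) (by decide) (by decide) (by decide)
  have k3 := key ("desserts", ["cake", "pie", "ice cream", "cookie", "brownie"]) (by decide) (by decide) (by decide)
  have k4 := key ("upgrades", ["large", "extra", "premium", "deluxe", "combo"]) (by decide) (by decide) (by decide)
  show PySem.Set.diff (PySem.Set.ofList (upsellCategories.map Prod.fst)) pres = _
  simp only [upsellCategories, List.map, PySem.Set.diff, List.filter]
  rw [show PySem.Set.ofList ["drinks", "sides", "desserts", "upgrades"] =
      ["drinks", "sides", "desserts", "upgrades"] from by decide]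
  simp only [List.filter_cons, List.filter_nil]
  rw [k1, k2, k3, k4]
  rcases h1 : (["soda", "juice", "water", "tea", "coffee"] : List String).any (fun kw => PySem.Str.isIn kw text) <;>
  rcases h2 : (["fries", "salad", "coleslaw", "breadsticks", "wings"] : List String).any (fun kw => PySem.Str.isIn kw text) <;>
  rcases h3 : (["cake", "pie", "ice cream", "cookie", "brownie"] : List String).any (fun kw => PySem.Str.isIn kw text) <;>
  rcases h4 : (["large", "extra", "premium", "deluxe", "combo"] : List String).any (fun kw => PySem.Str.isIn kw text) <;>
  simp <;> decide

-- ===== VERDICT (by name: the statement is the Claim_ definition above) =====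
theorem get_missing_categories_py_spec : Claim_equal_get_missing_categories_py := by
  intro items _
  unfold Spec_get_missing_categories_py
  exact get_missing_eq items
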